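-- pv_equiv track=rewrite | github.com/dimigiat/adventOfCode2016 | 19/solution.py | getWinner2
-- ===== SOURCE A (Python) =====
-- def getWinner2(numElves):
--     largest = 1
--     working = 1
--     for current in range(1, numElves + 1):
--         if working + 2 > current:
--             largest = working
--             working = 1
--         elif working < largest:
--             working += 1
--         else:
--             working += 2
--     return working
-- ===== SOURCE B (Python) =====
-- def getWinner2(numElves):
--     # Closed form for the Josephus "across the circle" variant:
--     # let p be the largest power of 3 <= numElves; the winner is
--     # numElves itself if it is a power of 3, numElves - p while that is <= p,
--     # and 2*numElves - 3*p beyond.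
--     if numElves <= 1:
--         return 1
--     p = 1
--     while p * 3 <= numElves:
--         p *= 3
--     if numElves == p:
--         return numElves
--     if numElves - p <= p:
--         return numElves - p
--     return 2 * numElves - 3 * p
-- ===== Notes on version B (the rewrite author's own statement) =====
-- stated objective: faster
-- what changed: Replaces the O(n) state-machine loop over every elf with the closed form based on the largest power of 3 <= numElves, computed in O(log n).
import Mathlib
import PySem

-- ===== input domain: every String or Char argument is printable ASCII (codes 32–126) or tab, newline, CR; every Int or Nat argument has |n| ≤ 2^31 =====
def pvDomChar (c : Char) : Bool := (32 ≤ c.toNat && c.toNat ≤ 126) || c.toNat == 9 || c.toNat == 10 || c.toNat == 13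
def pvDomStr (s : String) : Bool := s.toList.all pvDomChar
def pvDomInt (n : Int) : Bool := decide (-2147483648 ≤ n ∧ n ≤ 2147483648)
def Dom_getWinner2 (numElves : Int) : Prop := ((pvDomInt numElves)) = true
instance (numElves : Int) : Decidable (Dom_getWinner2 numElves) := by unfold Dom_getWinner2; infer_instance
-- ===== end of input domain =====

-- B replaces A's O(n) elf-by-elf state machine with the closed form built from the
-- largest power of 3 ≤ numElves (objective: faster).

-- ===== PORT A =====
-- loop body of A: state = (largest, working), current is the loop variable
def pvStepA (st : Int × Int) (current : Int) : Int × Int :=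
  if st.2 + 2 > current then (st.2, 1)
  else if st.2 < st.1 then (st.1, st.2 + 1)
  else (st.1, st.2 + 2)

def getWinner2 (numElves : Int) : Int :=
  ((PySem.List.pyRange 1 (numElves + 1) 1).foldl pvStepA (1, 1)).2

-- ===== PORT B =====
-- Source B's 'while p * 3 <= numElves: p *= 3'; the fuel argument only makes the loop total
def pvPow3Loop (numElves : Int) : Nat → Int → Int
  | 0, p => p
  | fuel + 1, p => if p * 3 ≤ numElves then pvPow3Loop numElves fuel (p * 3) else p

def getWinner2_alt (numElves : Int) : Int :=
  if numElves ≤ 1 then 1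
  else
    let p := pvPow3Loop numElves numElves.toNat 1
    if numElves = p then numElves
    else if numElves - p ≤ p then numElves - p
    else 2 * numElves - 3 * p

-- ===== PRECONDITION & SPEC =====
def Spec_getWinner2 (numElves : Int) (out : Int) : Prop := out = getWinner2_alt numElves
instance (numElves : Int) (out : Int) : Decidable (Spec_getWinner2 numElves out) := by unfold Spec_getWinner2; infer_instance

-- ===== CLAIM (what is proved, stated in full; the proofs are below) =====
def Claim_equal_getWinner2 : Prop := ∀ (numElves : Int), Dom_getWinner2 numElves → Spec_getWinner2 numElves (getWinner2 numElves)

-- ===== LEMMAS AND PROOFS =====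

-- A's loop body, applied mid-band: with largest = Q and current = m + 1 ≤ 3Q
lemma pvStep_mid (Q m : ℤ) (hq : 1 ≤ Q) (hbd : m + 1 ≤ 3 * Q) :
    pvStepA (Q, if m ≤ 2 * Q then m - Q else 2 * m - 3 * Q) (m + 1) =
    (Q, if m + 1 ≤ 2 * Q then m + 1 - Q else 2 * (m + 1) - 3 * Q) := by
  by_cases hm : m ≤ 2 * Q
  · rw [if_pos hm]
    simp only [pvStepA]
    split_ifs with h1 h2 h3
    all_goals rw [Prod.mk.injEq]
    all_goals refine ⟨?_, ?_⟩
    all_goals omega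
  · rw [if_neg hm]
    simp only [pvStepA]
    split_ifs with h1 h2 h3
    all_goals rw [Prod.mk.injEq]
    all_goals refine ⟨?_, ?_⟩
    all_goals omega

-- A's loop body at a band boundary: current = 3Q + 1 resets working to 1
lemma pvStep_boundary (Q : ℤ) (hq : 1 ≤ Q) :
    pvStepA (Q, if 3 * Q ≤ 2 * Q then 3 * Q - Q else 2 * (3 * Q) - 3 * Q) (3 * Q + 1) =
    (3 * Q, if 3 * Q + 1 ≤ 2 * (3 * Q) then 3 * Q + 1 - 3 * Q else 2 * (3 * Q + 1) - 3 * (3 * Q)) := by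
  rw [if_neg (by omega), if_pos (by omega)]
  simp only [pvStepA]
  split_ifs with h1 h2
  all_goals rw [Prod.mk.injEq]
  all_goals refine ⟨?_, ?_⟩
  all_goals omega

-- state of A's loop after processing current = 1 .. m
def pvS (m : ℕ) : Int × Int :=
  (PySem.List.pyRange 1 ((m : Int) + 1) 1).foldl pvStepA (1, 1)

lemma pvS_zero : pvS 0 = (1, 1) := by
  simp [pvS, PySem.List.pyRange_one_eq_nil]

lemma pvS_succ (m : ℕ) : pvS (m + 1) = pvStepA (pvS m) ((m : Int) + 1) := by
  unfold pvS
  rw [show ((m + 1 : ℕ) : Int) + 1 = ((m : Int) + 1) + 1 by push_cast; ring,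
      PySem.List.pyRange_one_succ_right (by omega), List.foldl_append]
  rfl

-- the while-loop of B finds the largest power of 3 ≤ numElves
lemma pvPow3Loop_spec : ∀ (fuel : ℕ) (n p : Int) (j : ℕ), p = 3 ^ j → p ≤ n →
    n < p * 3 ^ fuel →
    ∃ k : ℕ, pvPow3Loop n fuel p = 3 ^ k ∧ (3 : Int) ^ k ≤ n ∧ n < 3 ^ (k + 1) := by
  intro fuel
  induction fuel with
  | zero =>
    intro n p j hp hle hlt
    simp at hlt; omega
  | succ fuel ih =>
    intro n p j hp hle hlt
    unfold pvPow3Loop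
    by_cases h : p * 3 ≤ n
    · simp only [h, if_true]
      refine ih n (p * 3) (j + 1) (by rw [hp]; ring) h ?_
      calc n < p * 3 ^ (fuel + 1) := hlt
        _ = p * 3 * 3 ^ fuel := by ring
    · simp only [h, if_false]
      exact ⟨j, hp, hp ▸ hle, by rw [pow_succ, ← hp]; omega⟩

-- invariant of A's loop: in the band 3^k < m ≤ 3^(k+1), largest = 3^k and
-- working follows the closed form
lemma pvS_band : ∀ (m k : ℕ), 3 ^ k < m → m ≤ 3 ^ (k + 1) →
    pvS m = ((3 : Int) ^ k,
      if (m : Int) ≤ 2 * 3 ^ k then (m : Int) - 3 ^ k else 2 * m - 3 * 3 ^ k) := by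
  intro m
  induction m using Nat.strong_induction_on with
  | _ m ih =>
    intro k h1 h2
    have hm2 : 2 ≤ m := by
      have hk1 : 1 ≤ 3 ^ k := Nat.one_le_two_pow.trans (Nat.pow_le_pow_left (by norm_num) k)
      omega
    obtain ⟨m', rfl⟩ : ∃ m', m = m' + 1 := ⟨m - 1, by omega⟩
    rw [pvS_succ]
    by_cases hb : m' = 3 ^ k
    · -- the previous elf count sat exactly on the band boundary 3^k
      subst hb
      rcases Nat.eq_zero_or_pos k with hk0 | hkpos
      · subst hk0; norm_num [pvS_succ, pvS_zero, pvStepA]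
      · obtain ⟨k', rfl⟩ : ∃ k', k = k' + 1 := ⟨k - 1, by omega⟩
        have hib := ih (3 ^ (k' + 1)) (by omega) k'
          (Nat.pow_lt_pow_right (by norm_num) (by omega)) le_rfl
        rw [hib]
        have hq : (1 : Int) ≤ 3 ^ k' := one_le_pow₀ (by norm_num)
        have h3 : ((3 ^ (k' + 1) : ℕ) : Int) = 3 * 3 ^ k' := by push_cast [pow_succ]; ring
        have h4 : ((3 : Int) ^ (k' + 1)) = 3 * 3 ^ k' := by rw [pow_succ]; ring
        have h5 : (((3 ^ (k' + 1) + 1 : ℕ)) : Int) = 3 * 3 ^ k' + 1 := by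
          push_cast [pow_succ]; ring
        rw [h5, h3, h4]
        exact pvStep_boundary _ hq
    · -- the previous elf count was inside the same band
      have hib := ih m' (by omega) k (by omega) (by omega)
      rw [hib]
      have hq : (1 : Int) ≤ 3 ^ k := one_le_pow₀ (by norm_num)
      have hpow : ((3 ^ k : ℕ) : Int) = (3 : Int) ^ k := by push_cast; ring
      have hbd : ((m' : Int) + 1) ≤ 3 * 3 ^ k := by
        have h6 : ((m' + 1 : ℕ) : Int) ≤ ((3 ^ (k + 1) : ℕ) : Int) := Nat.cast_le.mpr h2
        have h7 : ((3 ^ (k + 1) : ℕ) : Int) = 3 * 3 ^ k := by push_cast [pow_succ]; ring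
        rw [h7] at h6; push_cast at h6; omega
      have h8 : (((m' + 1 : ℕ)) : Int) = (m' : Int) + 1 := by push_cast; ring
      rw [h8]
      exact pvStep_mid _ _ hq hbd

lemma getWinner2_eq_pvS (n : Int) (hn : 0 ≤ n) : getWinner2 n = (pvS n.toNat).2 := by
  unfold getWinner2 pvS
  rw [Int.toNat_of_nonneg hn]

-- ===== VERDICT (by name: the statement is the Claim_ definition above) =====
theorem getWinner2_spec : Claim_equal_getWinner2 := by
  intro n _
  unfold Spec_getWinner2 getWinner2_alt
  by_cases hle : n ≤ 1
  · simp only [hle, if_true]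
    rcases lt_or_ge n 1 with h0 | h1
    · unfold getWinner2
      rw [PySem.List.pyRange_one_eq_nil (by omega)]
      rfl
    · have : n = 1 := le_antisymm hle h1
      subst this; decide
  · have hle2 : 1 < n := by omega
    simp only [if_neg (by omega : ¬ n ≤ 1)]
    have hn0 : (0 : Int) ≤ n := by omega
    have hfuel : n < 1 * 3 ^ n.toNat := by
      have h1 : (n.toNat : Int) < (3 : Int) ^ n.toNat := by
        exact_mod_cast Nat.lt_pow_self (by norm_num : 1 < 3) (n := n.toNat)
      rw [one_mul]
      calc n = (n.toNat : Int) := (Int.toNat_of_nonneg hn0).symm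
        _ < _ := h1
    obtain ⟨k, hpk, hk1, hk2⟩ :=
      pvPow3Loop_spec n.toNat n 1 0 (by norm_num) (by omega) hfuel
    rw [hpk, getWinner2_eq_pvS n hn0]
    have hpow : ((3 ^ k : ℕ) : Int) = (3 : Int) ^ k := by push_cast; ring
    have hq : (1 : Int) ≤ 3 ^ k := one_le_pow₀ (by norm_num)
    by_cases heq : n = 3 ^ k
    · -- n is itself a power of 3 (k ≥ 1 since n ≥ 2)
      rw [if_pos heq]
      have hk0 : k ≠ 0 := by rintro rfl; norm_num at heq; omega
      obtain ⟨k', rfl⟩ : ∃ k', k = k' + 1 := ⟨k - 1, by omega⟩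
      have h5 : n = ((3 ^ (k' + 1) : ℕ) : Int) := by rw [heq, hpow]
      have hnat : n.toNat = 3 ^ (k' + 1) := by omega
      rw [pvS_band n.toNat k'
        (by rw [hnat]; exact Nat.pow_lt_pow_right (by norm_num) (by omega)) (by omega)]
      have hq' : (1 : Int) ≤ 3 ^ k' := one_le_pow₀ (by norm_num)
      have hc : ((n.toNat : ℕ) : Int) = 3 * 3 ^ k' := by
        rw [Int.toNat_of_nonneg hn0, heq, pow_succ]; ring
      have hn3 : n = 3 * 3 ^ k' := by rw [heq, pow_succ]; ring
      dsimp only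
      rw [hc, if_neg (by omega)]
      omega
    · -- 3^k < n < 3^(k+1)
      rw [if_neg heq]
      have hlt : (3 : Int) ^ k < n := lt_of_le_of_ne hk1 (fun h => heq h.symm)
      have hknat1 : 3 ^ k < n.toNat := by
        have : ((3 ^ k : ℕ) : Int) < n := by rw [hpow]; omega
        omega
      have hpow2 : ((3 ^ (k + 1) : ℕ) : Int) = 3 * 3 ^ k := by push_cast [pow_succ]; ring
      have hknat2 : n.toNat ≤ 3 ^ (k + 1) := by
        have h9 : n ≤ ((3 ^ (k + 1) : ℕ) : Int) := by rw [hpow2]; rw [pow_succ] at hk2; omega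
        omega
      rw [pvS_band n.toNat k hknat1 hknat2]
      have hc : (n.toNat : Int) = n := Int.toNat_of_nonneg hn0
      dsimp only
      rw [hc]
      rw [pow_succ] at hk2
      by_cases h10 : n ≤ 2 * (3:ℤ) ^ k
      · rw [if_pos h10, if_pos (by omega)]
      · rw [if_neg h10, if_neg (by omega)]
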